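-- pv_equiv track=rewrite | github.com/iQuHACK/2025-QuEra | team-solutions/Duckbergs/assets/valid_move_generator.py | count_qasm_gates_for_scoring
-- ===== SOURCE A (Python) =====
-- from typing import List, Tuple, Dict, Union
-- from typing import Callable, List, Tuple, Dict
--
-- def count_qasm_gates_for_scoring(steps: List[Tuple[str,List[int]]]) -> Dict[str,int]:
--     out= {
--         "apply_cz":0,
--         "apply_local_rz":0,
--         "apply_local_xy":0,
--         "apply_global_rz":0,
--         "apply_global_xy":0
--     }
--     for gtype,qubs in steps:
--         if gtype in ('cz','cx'):
--             out["apply_cz"]+=1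
--         elif gtype=='rz':
--             out["apply_local_rz"]+=1
--         elif gtype in ('rx','ry'):
--             out["apply_local_xy"]+=1
--         elif gtype=='grz':
--             out["apply_global_rz"]+=1
--         elif gtype in ('grx','gry'):
--             out["apply_global_xy"]+=1
--     return out
-- ===== SOURCE B (Python) =====
-- def count_qasm_gates_for_scoring(steps):
--     # Different decomposition: collect the gate names once, then build the
--     # result from per-name tallies aggregated into the five categories.
--     names = [g for g, _ in steps]
--     return {
--         "apply_cz": names.count("cz") + names.count("cx"),
--         "apply_local_rz": names.count("rz"),
--         "apply_local_xy": names.count("rx") + names.count("ry"),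
--         "apply_global_rz": names.count("grz"),
--         "apply_global_xy": names.count("grx") + names.count("gry"),
--     }
-- ===== Notes on version B (the rewrite author's own statement) =====
-- stated objective: simpler
-- what changed: B replaces A's per-step dict-mutation loop with a declarative construction: it extracts the gate names once and builds the five-key result directly from name tallies (list.count) aggregated per category.
import Mathlib
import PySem

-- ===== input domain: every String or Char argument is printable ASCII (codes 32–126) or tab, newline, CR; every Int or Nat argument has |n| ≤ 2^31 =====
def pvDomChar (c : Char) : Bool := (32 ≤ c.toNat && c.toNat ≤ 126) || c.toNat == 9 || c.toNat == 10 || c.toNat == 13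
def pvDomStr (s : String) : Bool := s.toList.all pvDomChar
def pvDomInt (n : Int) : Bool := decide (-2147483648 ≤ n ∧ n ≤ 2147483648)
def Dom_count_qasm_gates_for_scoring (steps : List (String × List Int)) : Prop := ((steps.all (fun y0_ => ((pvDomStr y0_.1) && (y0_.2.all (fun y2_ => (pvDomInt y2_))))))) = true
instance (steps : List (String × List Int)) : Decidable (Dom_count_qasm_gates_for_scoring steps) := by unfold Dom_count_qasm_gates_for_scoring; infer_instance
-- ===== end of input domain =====

-- B builds the five-key result directly from name tallies instead of mutating a dict per step (simpler decomposition, same O(n) cost).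

-- ===== PORT A =====
def count_qasm_gates_for_scoring (steps : List (String × List Int)) : List (String × Int) :=
  (steps.foldl (fun out p =>
      if p.1 == "cz" || p.1 == "cx" then out.modify "apply_cz" 0 (· + 1)
      else if p.1 == "rz" then out.modify "apply_local_rz" 0 (· + 1)
      else if p.1 == "rx" || p.1 == "ry" then out.modify "apply_local_xy" 0 (· + 1)
      else if p.1 == "grz" then out.modify "apply_global_rz" 0 (· + 1)
      else if p.1 == "grx" || p.1 == "gry" then out.modify "apply_global_xy" 0 (· + 1)
      else out)
    (PySem.Dict.ofList [("apply_cz", (0 : Int)), ("apply_local_rz", 0),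
                        ("apply_local_xy", 0), ("apply_global_rz", 0),
                        ("apply_global_xy", 0)])).items

-- ===== PORT B =====
def count_qasm_gates_for_scoring_alt (steps : List (String × List Int)) : List (String × Int) :=
  let names := steps.map (·.1)
  [("apply_cz", (PySem.List.count names "cz" : Int) + (PySem.List.count names "cx" : Int)),
   ("apply_local_rz", (PySem.List.count names "rz" : Int)),
   ("apply_local_xy", (PySem.List.count names "rx" : Int) + (PySem.List.count names "ry" : Int)),
   ("apply_global_rz", (PySem.List.count names "grz" : Int)),
   ("apply_global_xy", (PySem.List.count names "grx" : Int) + (PySem.List.count names "gry" : Int))]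

-- ===== PRECONDITION & SPEC =====
def Spec_count_qasm_gates_for_scoring (steps : List (String × List Int)) (out : List (String × Int)) : Prop := out = count_qasm_gates_for_scoring_alt steps
instance (steps : List (String × List Int)) (out : List (String × Int)) : Decidable (Spec_count_qasm_gates_for_scoring steps out) := by unfold Spec_count_qasm_gates_for_scoring; infer_instance

-- ===== CLAIM (what is proved, stated in full; the proofs are below) =====
def Claim_equal_count_qasm_gates_for_scoring : Prop := ∀ (steps : List (String × List Int)), Dom_count_qasm_gates_for_scoring steps → Spec_count_qasm_gates_for_scoring steps (count_qasm_gates_for_scoring steps)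

-- ===== LEMMAS AND PROOFS =====

-- Invariant of A's loop: starting from the five-entry dict with arbitrary values,
-- the fold adds the per-category name tallies of the remaining steps.
-- modify on the literal five-key dict, evaluated (used by countA_fold's branches)
theorem modA (a b c d e : Int) :
    (PySem.Dict.mk [("apply_cz", a), ("apply_local_rz", b), ("apply_local_xy", c),
      ("apply_global_rz", d), ("apply_global_xy", e)]).modify "apply_cz" 0 (· + 1) =
    PySem.Dict.mk [("apply_cz", a + 1), ("apply_local_rz", b), ("apply_local_xy", c),
      ("apply_global_rz", d), ("apply_global_xy", e)] := rfl

theorem modB (a b c d e : Int) :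
    (PySem.Dict.mk [("apply_cz", a), ("apply_local_rz", b), ("apply_local_xy", c),
      ("apply_global_rz", d), ("apply_global_xy", e)]).modify "apply_local_rz" 0 (· + 1) =
    PySem.Dict.mk [("apply_cz", a), ("apply_local_rz", b + 1), ("apply_local_xy", c),
      ("apply_global_rz", d), ("apply_global_xy", e)] := rfl

theorem modC (a b c d e : Int) :
    (PySem.Dict.mk [("apply_cz", a), ("apply_local_rz", b), ("apply_local_xy", c),
      ("apply_global_rz", d), ("apply_global_xy", e)]).modify "apply_local_xy" 0 (· + 1) =
    PySem.Dict.mk [("apply_cz", a), ("apply_local_rz", b), ("apply_local_xy", c + 1),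
      ("apply_global_rz", d), ("apply_global_xy", e)] := rfl

theorem modD (a b c d e : Int) :
    (PySem.Dict.mk [("apply_cz", a), ("apply_local_rz", b), ("apply_local_xy", c),
      ("apply_global_rz", d), ("apply_global_xy", e)]).modify "apply_global_rz" 0 (· + 1) =
    PySem.Dict.mk [("apply_cz", a), ("apply_local_rz", b), ("apply_local_xy", c),
      ("apply_global_rz", d + 1), ("apply_global_xy", e)] := rfl

theorem modE (a b c d e : Int) :
    (PySem.Dict.mk [("apply_cz", a), ("apply_local_rz", b), ("apply_local_xy", c),
      ("apply_global_rz", d), ("apply_global_xy", e)]).modify "apply_global_xy" 0 (· + 1) =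
    PySem.Dict.mk [("apply_cz", a), ("apply_local_rz", b), ("apply_local_xy", c),
      ("apply_global_rz", d), ("apply_global_xy", e + 1)] := rfl

theorem countA_fold (steps : List (String × List Int)) (a b c d e : Int) :
    (steps.foldl (fun out p =>
      if p.1 == "cz" || p.1 == "cx" then out.modify "apply_cz" 0 (· + 1)
      else if p.1 == "rz" then out.modify "apply_local_rz" 0 (· + 1)
      else if p.1 == "rx" || p.1 == "ry" then out.modify "apply_local_xy" 0 (· + 1)
      else if p.1 == "grz" then out.modify "apply_global_rz" 0 (· + 1)
      else if p.1 == "grx" || p.1 == "gry" then out.modify "apply_global_xy" 0 (· + 1)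
      else out)
      (PySem.Dict.mk [("apply_cz", a), ("apply_local_rz", b),
                      ("apply_local_xy", c), ("apply_global_rz", d),
                      ("apply_global_xy", e)])) =
    PySem.Dict.mk
      [("apply_cz", a + ((steps.map (·.1)).count "cz" : Int) + ((steps.map (·.1)).count "cx" : Int)),
       ("apply_local_rz", b + ((steps.map (·.1)).count "rz" : Int)),
       ("apply_local_xy", c + ((steps.map (·.1)).count "rx" : Int) + ((steps.map (·.1)).count "ry" : Int)),
       ("apply_global_rz", d + ((steps.map (·.1)).count "grz" : Int)),
       ("apply_global_xy", e + ((steps.map (·.1)).count "grx" : Int) + ((steps.map (·.1)).count "gry" : Int))] := by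
  induction steps generalizing a b c d e with
  | nil => simp
  | cons hd tl ih =>
    simp only [List.foldl_cons, List.map_cons]
    split_ifs with hc1 hc2 hc3 hc4 hc5
    · rw [modA, ih]
      rcases (by simpa using hc1 : hd.1 = "cz" ∨ hd.1 = "cx") with h | h <;>
        simp [h] <;> ring
    · rw [modB, ih]
      have h : hd.1 = "rz" := by simpa using hc2
      simp [h] <;> ring
    · rw [modC, ih]
      rcases (by simpa using hc3 : hd.1 = "rx" ∨ hd.1 = "ry") with h | h <;>
        simp [h] <;> ring
    · rw [modD, ih]
      have h : hd.1 = "grz" := by simpa using hc4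
      simp [h] <;> ring
    · rw [modE, ih]
      rcases (by simpa using hc5 : hd.1 = "grx" ∨ hd.1 = "gry") with h | h <;>
        simp [h] <;> ring
    · rw [ih]
      simp only [Bool.or_eq_true, not_or] at hc1 hc3 hc5
      have n1 : ¬ (hd.1 = "cz") := by simpa using hc1.1
      have n2 : ¬ (hd.1 = "cx") := by simpa using hc1.2
      have n3 : ¬ (hd.1 = "rz") := by simpa using hc2
      have n4 : ¬ (hd.1 = "rx") := by simpa using hc3.1
      have n5 : ¬ (hd.1 = "ry") := by simpa using hc3.2
      have n6 : ¬ (hd.1 = "grz") := by simpa using hc4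
      have n7 : ¬ (hd.1 = "grx") := by simpa using hc5.1
      have n8 : ¬ (hd.1 = "gry") := by simpa using hc5.2
      simp [n1, n2, n3, n4, n5, n6, n7, n8]

-- ===== VERDICT (by name: the statement is the Claim_ definition above) =====
theorem count_qasm_gates_for_scoring_spec : Claim_equal_count_qasm_gates_for_scoring := by
  intro steps _
  unfold Spec_count_qasm_gates_for_scoring count_qasm_gates_for_scoring count_qasm_gates_for_scoring_alt
  rw [show PySem.Dict.ofList [("apply_cz", (0 : Int)), ("apply_local_rz", 0),
        ("apply_local_xy", 0), ("apply_global_rz", 0), ("apply_global_xy", 0)] =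
      PySem.Dict.mk [("apply_cz", (0 : Int)), ("apply_local_rz", 0),
        ("apply_local_xy", 0), ("apply_global_rz", 0), ("apply_global_xy", 0)] from by decide]
  rw [countA_fold]
  simp [PySem.List.count]
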